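-- pv_equiv track=rewrite | github.com/daniel-android/Python | Testing_Nielsen_reducibility.py | inverting_a_word
-- ===== SOURCE A (Python) =====
-- def inverting_a_word(list):
-- 	#list=list0.copy()
-- 	list.reverse()
-- 	for i in range(0,len(list)):
-- 		if list[i]==1:
-- 			list[i]=-1;
-- 			continue
-- 		if list[i]==-1:
-- 			list[i]=1;
-- 			continue
-- 		if list[i]==2:
-- 			list[i]=-2;
-- 			continue
-- 		if list[i]==-2:
-- 			list[i]=2;
-- 			continue
-- 	return list
-- ===== SOURCE B (Python) =====
-- def inverting_a_word(list):
--     d = {1: -1, -1: 1, 2: -2, -2: 2}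
--     n = len(list)
--     for i in range(n // 2):
--         j = n - 1 - i
--         a, b = list[i], list[j]
--         list[i] = d.get(b, b)
--         list[j] = d.get(a, a)
--     if n % 2:
--         m = n // 2
--         list[m] = d.get(list[m], list[m])
--     return list
-- ===== Notes on version B (the rewrite author's own statement) =====
-- stated objective: alternative
-- what changed: Replaces reverse()-then-flip-scan (two passes over all n elements) by a single symmetric two-pointer pass over n//2 index pairs that swaps the ends while flipping via a dict, with a separate middle-element fix for odd length.
import Mathlib
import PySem

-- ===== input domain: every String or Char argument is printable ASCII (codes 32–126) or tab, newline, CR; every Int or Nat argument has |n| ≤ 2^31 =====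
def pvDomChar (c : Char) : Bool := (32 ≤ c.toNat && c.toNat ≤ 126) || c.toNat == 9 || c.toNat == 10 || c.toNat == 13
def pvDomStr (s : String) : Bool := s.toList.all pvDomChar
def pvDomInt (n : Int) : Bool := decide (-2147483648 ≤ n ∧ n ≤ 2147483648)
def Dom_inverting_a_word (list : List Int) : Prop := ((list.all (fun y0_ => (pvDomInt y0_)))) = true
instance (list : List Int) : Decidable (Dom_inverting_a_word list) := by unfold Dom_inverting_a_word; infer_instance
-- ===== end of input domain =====

-- B replaces A's reverse()+full flip-scan by one symmetric two-pointer pass swapping the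
-- ends while flipping (plus a middle fix for odd length); equal return values
-- (both Pythons also mutate the argument to the returned value).

-- ===== PORT A =====
-- the body of A's for-loop at index i (the four ifs with 'continue')
def pvStepA (acc : List Int) (i : Int) : List Int :=
  if PySem.List.pyGetD acc i 0 = 1 then PySem.List.pySetD acc i (-1)
  else if PySem.List.pyGetD acc i 0 = -1 then PySem.List.pySetD acc i 1
  else if PySem.List.pyGetD acc i 0 = 2 then PySem.List.pySetD acc i (-2)
  else if PySem.List.pyGetD acc i 0 = -2 then PySem.List.pySetD acc i 2
  else acc

def inverting_a_word (list : List Int) : List Int :=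
  let l := list.reverse
  (PySem.List.pyRange 0 (l.length : Int) 1).foldl pvStepA l

-- ===== PORT B =====
def pvDictB : PySem.Dict Int Int :=
  ((((PySem.Dict.empty).insert 1 (-1)).insert (-1) 1).insert 2 (-2)).insert (-2) 2

-- one iteration of B's for-loop: j = n-1-i; a,b = l[i],l[j]; l[i] = d.get(b,b); l[j] = d.get(a,a)
def pvStepB (n : Int) (acc : List Int) (i : Int) : List Int :=
  let j := n - 1 - i
  let a := PySem.List.pyGetD acc i 0
  let b := PySem.List.pyGetD acc j 0
  PySem.List.pySetD (PySem.List.pySetD acc i (pvDictB.getD b b)) j (pvDictB.getD a a)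

def inverting_a_word_alt (list : List Int) : List Int :=
  let n : Int := (list.length : Int)
  let l := (PySem.List.pyRange 0 (PySem.Int.floordiv n 2) 1).foldl (pvStepB n) list
  if PySem.Int.mod n 2 ≠ 0 then
    PySem.List.pySetD l (PySem.Int.floordiv n 2)
      (pvDictB.getD (PySem.List.pyGetD l (PySem.Int.floordiv n 2) 0)
                    (PySem.List.pyGetD l (PySem.Int.floordiv n 2) 0))
  else l

-- ===== PRECONDITION & SPEC =====
def Spec_inverting_a_word (list : List Int) (out : List Int) : Prop := out = inverting_a_word_alt list
instance (list : List Int) (out : List Int) : Decidable (Spec_inverting_a_word list out) := by unfold Spec_inverting_a_word; infer_instance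

-- ===== CLAIM (what is proved, stated in full; the proofs are below) =====
def Claim_equal_inverting_a_word : Prop := ∀ (list : List Int), Dom_inverting_a_word list → Spec_inverting_a_word list (inverting_a_word list)

-- ===== LEMMAS AND PROOFS =====
-- the pointwise flip both programs apply
def pvFlip (x : Int) : Int :=
  if x = 1 then -1 else if x = -1 then 1 else if x = 2 then -2 else if x = -2 then 2 else x

theorem pvDictB_getD (x : Int) : pvDictB.getD x x = pvFlip x := by
  simp only [pvDictB, pvFlip, PySem.Dict.getD_insert, PySem.Dict.getD_empty]
  split_ifs <;> omega

-- ===== A-side =====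
theorem pvStepA_at (pre suf : List Int) (x : Int) :
    pvStepA (pre ++ x :: suf) (pre.length : Int) = pre ++ pvFlip x :: suf := by
  have hget : PySem.List.pyGetD (pre ++ x :: suf) (pre.length : Int) 0 = x := by
    simp [PySem.List.pyGetD_natCast, List.getD]
  have hset : ∀ v : Int, PySem.List.pySetD (pre ++ x :: suf) (pre.length : Int) v = pre ++ v :: suf := by
    intro v; simp [PySem.List.pySetD_natCast]
  unfold pvStepA pvFlip
  rw [hget]
  split_ifs <;> simp [hset]

theorem pvFoldA : ∀ (suf pre : List Int),
    (PySem.List.pyRange (pre.length : Int) ((pre.length : Int) + (suf.length : Int)) 1).foldl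
      pvStepA (pre ++ suf) = pre ++ suf.map pvFlip := by
  intro suf
  induction suf with
  | nil =>
      intro pre
      rw [PySem.List.pyRange_one_eq_nil (by simp)]
      simp
  | cons x xs ih =>
      intro pre
      rw [PySem.List.pyRange_one_cons (by simp)]
      simp only [List.foldl_cons, pvStepA_at]
      have h1 : ((pre.length : Int) + 1) = (((pre ++ [pvFlip x]).length : Int)) := by
        simp
      have h2 : ((pre.length : Int) + ((x :: xs).length : Int))
          = (((pre ++ [pvFlip x]).length : Int)) + (xs.length : Int) := by
        simp; omega
      have h3 : pre ++ pvFlip x :: xs = (pre ++ [pvFlip x]) ++ xs := by simp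
      rw [h1, h2, h3, ih (pre ++ [pvFlip x])]
      simp

theorem portA_eq (list : List Int) : inverting_a_word list = list.reverse.map pvFlip := by
  unfold inverting_a_word
  have := pvFoldA list.reverse []
  simpa using this

-- ===== B-side =====
-- state of B's loop after k iterations: first k and last k slots hold the answer, middle untouched
def pvMix (l : List Int) (k : Nat) : List Int :=
  (List.range l.length).map
    (fun i => if i < k ∨ l.length - k ≤ i then pvFlip (l.getD (l.length - 1 - i) 0) else l.getD i 0)

theorem pvMix_length (l : List Int) (k : Nat) : (pvMix l k).length = l.length := by
  simp [pvMix]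

theorem pvMix_getD (l : List Int) (k i : Nat) (h : i < l.length) :
    (pvMix l k).getD i 0
      = if i < k ∨ l.length - k ≤ i then pvFlip (l.getD (l.length - 1 - i) 0) else l.getD i 0 := by
  rw [List.getD_eq_getElem _ _ (by simp [pvMix_length, h])]
  simp [pvMix]

theorem pvMix_zero (l : List Int) : pvMix l 0 = l := by
  apply List.ext_getElem (by simp [pvMix_length])
  intro i h1 h2
  simp only [pvMix, List.getElem_map, List.getElem_range]
  rw [if_neg (by omega), List.getD_eq_getElem _ _ h2]

theorem pvStepB_mix (l : List Int) (k : Nat) (hk : k < l.length / 2) :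
    pvStepB (l.length : Int) (pvMix l k) (k : Int) = pvMix l (k + 1) := by
  have hkn : k < l.length := by omega
  have hj : l.length - 1 - k < l.length := by omega
  have hcastj : ((l.length : Int) - 1 - (k : Int)) = ((l.length - 1 - k : Nat) : Int) := by omega
  have ha : (pvMix l k).getD k 0 = l.getD k 0 := by
    rw [pvMix_getD l k k hkn, if_neg (by omega)]
  have hb : (pvMix l k).getD (l.length - 1 - k) 0 = l.getD (l.length - 1 - k) 0 := by
    rw [pvMix_getD l k _ hj, if_neg (by omega)]
  unfold pvStepB
  rw [hcastj]
  simp only [PySem.List.pyGetD_natCast, PySem.List.pySetD_natCast, ha, hb, pvDictB_getD]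
  apply List.ext_getElem (by simp [pvMix_length])
  intro i h1 h2
  have hi : i < l.length := by simpa [pvMix_length] using h2
  rw [List.getElem_set, List.getElem_set]
  simp only [pvMix, List.getElem_map, List.getElem_range]
  by_cases hij : l.length - 1 - k = i
  · rw [if_pos hij, if_pos (by omega)]
    have : l.length - 1 - i = k := by omega
    rw [this]
  · rw [if_neg hij]
    by_cases hik : k = i
    · rw [if_pos hik, if_pos (by omega)]
      subst hik
      rfl
    · rw [if_neg hik]
      by_cases hc : i < k ∨ l.length - k ≤ i
      · rw [if_pos hc, if_pos (by omega)]
      · rw [if_neg hc, if_neg (by omega)]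

theorem pvFoldB (l : List Int) : ∀ (k : Nat), k ≤ l.length / 2 →
    (PySem.List.pyRange 0 (k : Int) 1).foldl (pvStepB (l.length : Int)) l = pvMix l k := by
  intro k
  induction k with
  | zero =>
      intro _
      rw [PySem.List.pyRange_one_eq_nil (by simp)]
      simpa using (pvMix_zero l).symm
  | succ k ih =>
      intro hk
      have hsplit : PySem.List.pyRange 0 ((k + 1 : Nat) : Int) 1
          = PySem.List.pyRange 0 (k : Int) 1 ++ PySem.List.pyRange (k : Int) ((k + 1 : Nat) : Int) 1 := by
        exact PySem.List.pyRange_one_append 0 (k : Int) _ (by omega) (by push_cast; omega)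
      have hone : PySem.List.pyRange (k : Int) ((k + 1 : Nat) : Int) 1 = [(k : Int)] := by
        rw [PySem.List.pyRange_one_cons (by push_cast; omega),
            PySem.List.pyRange_one_eq_nil (by push_cast; omega)]
      rw [hsplit, hone, List.foldl_append, ih (by omega), List.foldl_cons, List.foldl_nil,
          pvStepB_mix l k (by omega)]

theorem pvMix_half_even (l : List Int) (h : l.length % 2 = 0) :
    pvMix l (l.length / 2) = l.reverse.map pvFlip := by
  apply List.ext_getElem (by simp [pvMix_length])
  intro i h1 h2
  have hi : i < l.length := by simpa [pvMix_length] using h1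
  simp only [pvMix, List.getElem_map, List.getElem_range, List.getElem_reverse]
  rw [if_pos (by omega), List.getD_eq_getElem _ _ (by omega)]

theorem pvOdd_final (l : List Int) (h : l.length % 2 = 1) :
    (pvMix l (l.length / 2)).set (l.length / 2)
        (pvFlip ((pvMix l (l.length / 2)).getD (l.length / 2) 0))
      = l.reverse.map pvFlip := by
  have hm : l.length / 2 < l.length := by omega
  have hmid : (pvMix l (l.length / 2)).getD (l.length / 2) 0 = l.getD (l.length / 2) 0 := by
    rw [pvMix_getD l _ _ hm, if_neg (by omega)]
  apply List.ext_getElem (by simp [pvMix_length])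
  intro i h1 h2
  have hi : i < l.length := by
    have := h1; simp only [List.length_set, pvMix_length] at this; exact this
  rw [List.getElem_set]
  simp only [List.getElem_map, List.getElem_reverse]
  by_cases hc : l.length / 2 = i
  · rw [if_pos hc, hmid, List.getD_eq_getElem _ _ hm]
    have hidx : l.length - 1 - i = l.length / 2 := by omega
    simp [hidx]
  · rw [if_neg hc]
    simp only [pvMix, List.getElem_map, List.getElem_range]
    rw [if_pos (by omega), List.getD_eq_getElem _ _ (by omega)]

theorem portB_eq (list : List Int) : inverting_a_word_alt list = list.reverse.map pvFlip := by
  unfold inverting_a_word_alt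
  have hfd : PySem.Int.floordiv (list.length : Int) 2 = ((list.length / 2 : Nat) : Int) := by
    exact_mod_cast PySem.Int.floordiv_natCast list.length 2
  have hmod : PySem.Int.mod (list.length : Int) 2 = ((list.length % 2 : Nat) : Int) := by
    exact_mod_cast PySem.Int.mod_natCast list.length 2
  simp only [hfd, hmod, pvFoldB list (list.length / 2) (le_refl _)]
  rcases Nat.mod_two_eq_zero_or_one list.length with he | ho
  · rw [if_neg (by simp [he])]
    exact pvMix_half_even list he
  · rw [if_pos (by simp [ho])]
    simp only [PySem.List.pyGetD_natCast, PySem.List.pySetD_natCast, pvDictB_getD]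
    exact pvOdd_final list ho

-- ===== VERDICT (by name: the statement is the Claim_ definition above) =====
theorem inverting_a_word_spec : Claim_equal_inverting_a_word := by
  intro list _
  unfold Spec_inverting_a_word
  rw [portA_eq, portB_eq]
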